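-- pv_equiv track=rewrite | github.com/benjaminmah/bugbug | scripts/inline_comments_data_collection.py | has_no_comments_after_within_revision
-- ===== SOURCE A (Python) =====
-- def has_no_comments_after_within_revision(patch_id, revision_id, patches_by_revision):
--     if revision_id not in patches_by_revision:
--         raise KeyError(f"Revision ID {revision_id} not found in patches_by_revision")
--
--     sorted_patches = patches_by_revision[revision_id]
--
--     for i, (current_patch_id, has_comments) in enumerate(sorted_patches):
--         if current_patch_id == patch_id:
--             for _, next_has_comments in sorted_patches[i + 1 :]:
--                 if next_has_comments:
--                     return False
--             return True
--
--     raise KeyError(f"Patch ID {patch_id} not found in revision {revision_id}")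
-- ===== SOURCE B (Python) =====
-- def has_no_comments_after_within_revision(patch_id, revision_id, patches_by_revision):
--     if revision_id not in patches_by_revision:
--         raise KeyError(f"Revision ID {revision_id} not found in patches_by_revision")
--
--     sorted_patches = patches_by_revision[revision_id]
--
--     patch_ids = [pid for pid, _ in sorted_patches]
--     if patch_id not in patch_ids:
--         raise KeyError(f"Patch ID {patch_id} not found in revision {revision_id}")
--
--     first_pos = patch_ids.index(patch_id)
--     last_comment_pos = max(
--         (j for j, (_, has_comments) in enumerate(sorted_patches) if has_comments),
--         default=-1,
--     )
--     # True iff every commented patch sits at or before the first occurrence of patch_id.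
--     return last_comment_pos <= first_pos
-- ===== Notes on version B (the rewrite author's own statement) =====
-- stated objective: alternative
-- what changed: Instead of A's find-then-scan-the-suffix control flow, B reduces the question to index arithmetic: it computes the first position of patch_id and the maximal position of any commented patch in two independent staged passes and returns last_comment_pos <= first_pos, with no nested/suffix scan at all.
import Mathlib
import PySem

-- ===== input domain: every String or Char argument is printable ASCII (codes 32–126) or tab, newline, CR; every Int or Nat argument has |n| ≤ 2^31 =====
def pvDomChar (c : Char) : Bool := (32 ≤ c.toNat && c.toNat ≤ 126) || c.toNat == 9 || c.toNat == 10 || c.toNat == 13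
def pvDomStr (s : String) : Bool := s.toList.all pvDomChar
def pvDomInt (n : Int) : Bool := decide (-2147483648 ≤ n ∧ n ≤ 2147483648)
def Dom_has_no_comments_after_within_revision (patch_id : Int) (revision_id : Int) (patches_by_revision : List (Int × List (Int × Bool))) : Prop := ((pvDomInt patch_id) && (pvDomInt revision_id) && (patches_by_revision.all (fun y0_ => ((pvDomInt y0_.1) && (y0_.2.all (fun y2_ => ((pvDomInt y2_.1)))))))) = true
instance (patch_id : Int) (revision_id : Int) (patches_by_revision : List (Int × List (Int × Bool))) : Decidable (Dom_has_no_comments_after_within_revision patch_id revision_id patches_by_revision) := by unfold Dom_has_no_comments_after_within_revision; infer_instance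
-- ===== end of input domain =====

-- B replaces A's find-then-scan-suffix control flow by index arithmetic: first position of
-- patch_id vs maximal position of a commented patch (objective: alternative decomposition).

-- ===== PORT A =====
-- inner loop of A: 'for _, next_has_comments in sorted_patches[i+1:]'
def pvScanAfter : List (Int × Bool) → Bool
  | [] => true
  | (_, hc) :: rest => if hc then false else pvScanAfter rest

-- outer loop of A: find first entry with current_patch_id == patch_id, then scan the rest;
-- none = the KeyError "Patch ID not found"
def pvFindA (patch_id : Int) : List (Int × Bool) → Option Bool
  | [] => none
  | (c, _) :: rest => if c == patch_id then some (pvScanAfter rest) else pvFindA patch_id rest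

def has_no_comments_after_within_revision (patch_id : Int) (revision_id : Int) (patches_by_revision : List (Int × List (Int × Bool))) : Bool :=
  match (PySem.Dict.mk patches_by_revision).get? revision_id with
  | none => false        -- KeyError: revision missing (outside Pre_)
  | some sp =>
    match pvFindA patch_id sp with
    | none => false      -- KeyError: patch missing (outside Pre_)
    | some b => b

-- ===== PORT B =====
-- max((j for j,(_,hc) in enumerate(l) if hc), default=a), indices taken from start s;
-- Python's max with a default is the running-max fold (all indices are ≥ the default -1)
def pvLastCommentPos (a s : Int) (l : List (Int × Bool)) : Int :=
  ((PySem.List.enumerate l s).filterMap (fun jp => if jp.2.2 then some jp.1 else none)).foldl max a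

def has_no_comments_after_within_revision_alt (patch_id : Int) (revision_id : Int) (patches_by_revision : List (Int × List (Int × Bool))) : Bool :=
  match (PySem.Dict.mk patches_by_revision).get? revision_id with
  | none => false        -- KeyError: revision missing (outside Pre_)
  | some sp =>
    let patch_ids := sp.map Prod.fst
    match PySem.List.index? patch_ids patch_id with
    | none => false      -- KeyError: patch missing (outside Pre_)
    | some first_pos => decide (pvLastCommentPos (-1) 0 sp ≤ (first_pos : Int))

-- ===== PRECONDITION & SPEC =====
-- Pre_ excludes exactly the inputs on which A raises KeyError: the revision must be present
-- (first-match dict lookup) and the patch id must occur in its patch list.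
def Pre_has_no_comments_after_within_revision (patch_id : Int) (revision_id : Int) (patches_by_revision : List (Int × List (Int × Bool))) : Prop :=
  patch_id ∈ (((PySem.Dict.mk patches_by_revision).getD revision_id []).map Prod.fst)

instance (patch_id : Int) (revision_id : Int) (patches_by_revision : List (Int × List (Int × Bool))) : Decidable (Pre_has_no_comments_after_within_revision patch_id revision_id patches_by_revision) := by unfold Pre_has_no_comments_after_within_revision; infer_instance

def pvWitness_has_no_comments_after_within_revision : Int × Int × (List (Int × List (Int × Bool))) :=
  (1, 2, [(2, [(1, false), (3, true)])])

def Spec_has_no_comments_after_within_revision (patch_id : Int) (revision_id : Int) (patches_by_revision : List (Int × List (Int × Bool))) (out : Bool) : Prop := out = has_no_comments_after_within_revision_alt patch_id revision_id patches_by_revision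
instance (patch_id : Int) (revision_id : Int) (patches_by_revision : List (Int × List (Int × Bool))) (out : Bool) : Decidable (Spec_has_no_comments_after_within_revision patch_id revision_id patches_by_revision out) := by unfold Spec_has_no_comments_after_within_revision; infer_instance

-- ===== CLAIM (what is proved, stated in full; the proofs are below) =====
def Claim_equal_has_no_comments_after_within_revision : Prop := ∀ (patch_id : Int) (revision_id : Int) (patches_by_revision : List (Int × List (Int × Bool))), Dom_has_no_comments_after_within_revision patch_id revision_id patches_by_revision → Pre_has_no_comments_after_within_revision patch_id revision_id patches_by_revision → Spec_has_no_comments_after_within_revision patch_id revision_id patches_by_revision (has_no_comments_after_within_revision patch_id revision_id patches_by_revision)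

-- ===== LEMMAS AND PROOFS =====
-- a fold of max never drops below its accumulator
theorem pv_le_foldl_max (l : List Int) (a : Int) : a ≤ l.foldl max a := by
  induction l generalizing a with
  | nil => simp
  | cons x t ih => exact le_trans (le_max_left a x) (ih (max a x))

-- unfolding pvLastCommentPos over a cons cell
theorem pvLastCommentPos_cons (a s : Int) (c : Int) (hc : Bool) (t : List (Int × Bool)) :
    pvLastCommentPos a s ((c, hc) :: t) =
      pvLastCommentPos (if hc then max a s else hc.rec a a) (s + 1) t := by
  cases hc <;> simp [pvLastCommentPos, PySem.List.enumerate_cons]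

-- A's suffix scan equals "the running max of commented positions from s stays ≤ i" (a ≤ i < s)
theorem pv_scan_eq (t : List (Int × Bool)) (a i s : Int) (ha : a ≤ i) (hs : i < s) :
    decide (pvLastCommentPos a s t ≤ i) = pvScanAfter t := by
  induction t generalizing a s with
  | nil => simp [pvLastCommentPos, pvScanAfter, PySem.List.enumerate, ha]
  | cons hd t ih =>
    obtain ⟨c, hc⟩ := hd
    rw [pvLastCommentPos_cons]
    cases hc with
    | false =>
      simpa [pvScanAfter] using ih a (s + 1) ha (by omega)
    | true =>
      have h1 : max a s ≤ pvLastCommentPos (max a s) (s + 1) t := pv_le_foldl_max _ _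
      have h2 : ¬ pvLastCommentPos (max a s) (s + 1) t ≤ i := by
        have : s ≤ max a s := le_max_right a s
        omega
      simp [pvScanAfter, h2]

-- main lemma: A's find-then-scan equals B's "last commented position ≤ first position"
theorem pv_find_eq (patch_id : Int) (sp : List (Int × Bool)) (a s : Int) (ha : a ≤ s) :
    pvFindA patch_id sp =
      (PySem.List.index? (sp.map Prod.fst) patch_id).map
        (fun (k : Nat) => decide (pvLastCommentPos a s sp ≤ s + (k : Int))) := by
  induction sp generalizing a s with
  | nil => simp [pvFindA, PySem.List.index?]
  | cons hd t ih =>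
    obtain ⟨c, hc⟩ := hd
    by_cases h : c = patch_id
    · subst h
      simp only [List.map_cons]
      rw [PySem.List.index?_cons_self, pvLastCommentPos_cons]
      have heq : (decide (pvLastCommentPos (if hc then max a s else hc.rec a a) (s + 1) t ≤ s + ((0 : Nat) : Int))) = pvScanAfter t := by
        cases hc with
        | false => simpa using pv_scan_eq t a s (s + 1) (by omega) (by omega)
        | true => simpa using pv_scan_eq t (max a s) s (s + 1) (by omega) (by omega)
      simp only [Option.map_some, heq, pvFindA, BEq.rfl, if_true]
    · have hne : ¬ (c == patch_id) = true := by simp [h]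
      simp only [List.map_cons]
      rw [PySem.List.index?_cons_of_ne _ h, pvLastCommentPos_cons]
      have ha' : (if hc then max a s else hc.rec a a) ≤ s + 1 := by
        cases hc <;> simp <;> omega
      rw [Option.map_map]
      have := ih (if hc then max a s else hc.rec a a) (s + 1) ha'
      simp only [pvFindA, hne, this]
      cases PySem.List.index? (List.map Prod.fst t) patch_id with
      | none => rfl
      | some k =>
        simp only [Option.map_some, Function.comp, Nat.cast_add, Nat.cast_one,
          Bool.false_eq_true, if_false]
        have h2 : s + 1 + (k : Int) = s + ((k : Int) + 1) := by ring
        rw [h2]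

-- the body of both functions after a successful revision lookup
theorem pv_body (patch_id : Int) (sp : List (Int × Bool)) :
    (match pvFindA patch_id sp with
     | none => false
     | some b => b) =
    (let patch_ids := sp.map Prod.fst
     match PySem.List.index? patch_ids patch_id with
     | none => false
     | some first_pos => decide (pvLastCommentPos (-1) 0 sp ≤ (first_pos : Int))) := by
  rw [pv_find_eq patch_id sp (-1) 0 (by omega)]
  cases h : PySem.List.index? (sp.map Prod.fst) patch_id <;>
    rw [PySem.List.index?_eq_idxOf?] at h <;> simp [h]

-- ===== VERDICT (by name: the statement is the Claim_ definition above) =====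
theorem has_no_comments_after_within_revision_spec : Claim_equal_has_no_comments_after_within_revision := by
  intro patch_id revision_id patches_by_revision _ _
  unfold Spec_has_no_comments_after_within_revision
  unfold has_no_comments_after_within_revision has_no_comments_after_within_revision_alt
  cases (PySem.Dict.mk patches_by_revision).get? revision_id with
  | none => rfl
  | some sp => exact pv_body patch_id sp
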